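-- pv_equiv track=rewrite | github.com/tmfrlrkvlek/algorithm_python | Programmers/Python/92334.py | solution
-- ===== SOURCE A (Python) =====
-- def solution(id_list, report, k):
--     declaration = {id: set() for id in id_list}
--     for re in report :
--         declared, reported = map(str, re.split())
--         declaration[declared].add(reported)
--     counts = {id: 0 for id in id_list}
--     for de in declaration:
--         for p in list(declaration[de]) : counts[p]+=1
--     stoppedUser = set()
--     [stoppedUser.add(p) for p in counts if counts[p] >= k]
--     return [len(declaration[id] & stoppedUser) for id in id_list]
-- ===== SOURCE B (Python) =====
-- def solution(id_list, report, k):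
--     # flat list of distinct (reporter, reported) pairs, first-occurrence order
--     pairs = []
--     seen = set()
--     for r in report:
--         a, b = r.split()
--         if (a, b) not in seen:
--             seen.add((a, b))
--             pairs.append((a, b))
--     # distinct-reporter count per reported user
--     cnt = {}
--     for _, b in pairs:
--         cnt[b] = cnt.get(b, 0) + 1
--     # one pass over the pairs credits reporters of banned users
--     res = {i: 0 for i in id_list}
--     for a, b in pairs:
--         if cnt[b] >= k:
--             res[a] += 1
--     return [res[i] for i in id_list]
-- ===== Notes on version B (the rewrite author's own statement) =====
-- stated objective: alternative
-- what changed: Replaces A's per-user reported-sets plus final set intersections with a flat deduplicated (reporter, reported) pair list processed in two counting passes (distinct-reporter counts, then crediting reporters of banned users).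
import Mathlib
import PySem

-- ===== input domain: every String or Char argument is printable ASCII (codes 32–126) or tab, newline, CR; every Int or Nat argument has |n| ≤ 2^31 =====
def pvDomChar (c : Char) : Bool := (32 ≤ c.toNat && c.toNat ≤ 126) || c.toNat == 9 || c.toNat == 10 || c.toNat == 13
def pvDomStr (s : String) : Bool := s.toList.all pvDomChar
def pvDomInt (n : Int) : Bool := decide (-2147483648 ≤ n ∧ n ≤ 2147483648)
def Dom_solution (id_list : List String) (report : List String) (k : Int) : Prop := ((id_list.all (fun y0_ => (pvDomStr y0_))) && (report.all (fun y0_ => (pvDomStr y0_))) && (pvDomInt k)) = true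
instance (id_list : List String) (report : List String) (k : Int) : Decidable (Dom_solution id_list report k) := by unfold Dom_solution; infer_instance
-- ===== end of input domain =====

-- ===== PORT A =====
-- B replaces A's per-user reported-sets and final set intersections with a flat
-- deduplicated (reporter, reported) pair list processed in two counting passes.
-- A-side helpers: A's successive local variables, one definition each.
def pvDeclInit (id_list : List String) : PySem.Dict String (PySem.Set String) :=
  id_list.foldl (fun d id => d.insert id PySem.Set.empty) PySem.Dict.empty

def pvDecl (id_list : List String) (report : List String) : PySem.Dict String (PySem.Set String) :=
  report.foldl (fun d re =>
    match PySem.Str.split₀ re with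
    | [declared, reported] => d.modify declared PySem.Set.empty (fun s => PySem.Set.add s reported)
    | _ => d) (pvDeclInit id_list)

def pvCountsInit (id_list : List String) : PySem.Dict String Int :=
  id_list.foldl (fun d id => d.insert id (0 : Int)) PySem.Dict.empty

def pvCounts (id_list : List String) (report : List String) : PySem.Dict String Int :=
  (pvDecl id_list report).items.foldl (fun c de =>
    de.2.foldl (fun c p => c.modify p 0 (fun x => x + 1)) c) (pvCountsInit id_list)

def pvStopped (id_list : List String) (report : List String) (k : Int) : PySem.Set String :=
  (pvCounts id_list report).keys.foldl (fun st p =>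
    if k ≤ (pvCounts id_list report).getD p 0 then PySem.Set.add st p else st) PySem.Set.empty

def solution (id_list : List String) (report : List String) (k : Int) : List Int :=
  id_list.map (fun id =>
    PySem.Set.len (PySem.Set.inter ((pvDecl id_list report).getD id PySem.Set.empty)
      (pvStopped id_list report k)))

-- ===== PORT B =====
-- B-side helpers: B's local variables.
def pvPairs (report : List String) : List (String × String) :=
  (report.foldl (fun acc r =>
    match PySem.Str.split₀ r with
    | [a, b] =>
        if PySem.Set.contains acc.2 (a, b) then acc
        else (acc.1 ++ [(a, b)], PySem.Set.add acc.2 (a, b))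
    | _ => acc) (([] : List (String × String)), (PySem.Set.empty : PySem.Set (String × String)))).1

def pvCnt (report : List String) : PySem.Dict String Int :=
  (pvPairs report).foldl (fun d p => d.insert p.2 (d.getD p.2 0 + 1)) PySem.Dict.empty

def pvResInit (id_list : List String) : PySem.Dict String Int :=
  id_list.foldl (fun d i => d.insert i (0 : Int)) PySem.Dict.empty

def pvRes (id_list : List String) (report : List String) (k : Int) : PySem.Dict String Int :=
  (pvPairs report).foldl (fun d p =>
    if k ≤ (pvCnt report).getD p.2 0 then d.modify p.1 0 (fun x => x + 1) else d)
    (pvResInit id_list)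

def solution_alt (id_list : List String) (report : List String) (k : Int) : List Int :=
  id_list.map (fun i => (pvRes id_list report k).getD i 0)

-- ===== PRECONDITION & SPEC =====
-- Pre_ excludes exactly the inputs on which A raises: a report entry that does not split
-- into exactly two whitespace-separated tokens (ValueError on unpacking), or a reporter or
-- reported id that is not in id_list (KeyError on declaration[declared] / counts[p]).
def Pre_solution (id_list : List String) (report : List String) (k : Int) : Prop :=
  ∀ r ∈ report, (PySem.Str.split₀ r).length = 2 ∧ ∀ t ∈ PySem.Str.split₀ r, t ∈ id_list
instance (id_list : List String) (report : List String) (k : Int) : Decidable (Pre_solution id_list report k) := by unfold Pre_solution; infer_instance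

def pvWitness_solution : List String × List String × Int :=
  (["muzi", "frodo", "apeach", "neo"],
   ["muzi frodo", "apeach frodo", "frodo neo", "muzi neo", "apeach muzi"], 2)

def Spec_solution (id_list : List String) (report : List String) (k : Int) (out : List Int) : Prop := out = solution_alt id_list report k
instance (id_list : List String) (report : List String) (k : Int) (out : List Int) : Decidable (Spec_solution id_list report k out) := by unfold Spec_solution; infer_instance

-- ===== CLAIM (what is proved, stated in full; the proofs are below) =====
def Claim_equal_solution : Prop := ∀ (id_list : List String) (report : List String) (k : Int), Dom_solution id_list report k → Pre_solution id_list report k → Spec_solution id_list report k (solution id_list report k)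

-- ===== LEMMAS AND PROOFS =====

-- the (reporter, reported) pair a well-formed report line denotes
def pvPairOf (r : String) : String × String :=
  match PySem.Str.split₀ r with
  | [a, b] => (a, b)
  | _ => ("", "")

-- folding A's report loop is folding the pair list (under Pre_)
theorem pvDecl_fold_pairs (report : List String)
    (h : ∀ r ∈ report, (PySem.Str.split₀ r).length = 2)
    (d : PySem.Dict String (PySem.Set String)) :
    report.foldl (fun d re =>
      match PySem.Str.split₀ re with
      | [declared, reported] => d.modify declared PySem.Set.empty (fun s => PySem.Set.add s reported)
      | _ => d) d
    = (report.map pvPairOf).foldl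
        (fun d p => d.modify p.1 PySem.Set.empty (fun s => PySem.Set.add s p.2)) d := by
  rw [List.foldl_map]
  apply PySem.List.foldl_congr_mem
  intro acc r hr
  have h2 := h r hr
  rcases hl : PySem.Str.split₀ r with _ | ⟨a, _ | ⟨b, _ | ⟨c, t⟩⟩⟩ <;>
    simp [hl] at h2 ⊢ <;> simp [pvPairOf, hl]

-- folding B's dedup loop from an equal (list, set) state
theorem pvPairs_fold (l : List (String × String)) (s : PySem.Set (String × String)) :
    l.foldl (fun acc p =>
      if PySem.Set.contains acc.2 p then acc
      else (acc.1 ++ [p], PySem.Set.add acc.2 p)) (s, s)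
    = (PySem.Set.update s l, PySem.Set.update s l) := by
  induction l generalizing s with
  | nil => simp [PySem.Set.update_nil]
  | cons p l ih =>
    rw [List.foldl_cons, PySem.Set.update_cons]
    by_cases hp : p ∈ s
    · rw [if_pos (by simpa [PySem.Set.contains_iff] using hp)]
      rw [PySem.Set.add_of_mem hp] at *
      exact ih s
    · rw [if_neg (by simpa [PySem.Set.contains_iff] using hp)]
      have := ih (PySem.Set.add s p)
      rwa [PySem.Set.add_of_not_mem hp] at this ⊢

theorem pvPairs_eq (report : List String)
    (h : ∀ r ∈ report, (PySem.Str.split₀ r).length = 2) :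
    pvPairs report = PySem.List.dedup (report.map pvPairOf) := by
  unfold pvPairs
  have hc : report.foldl (fun acc r =>
      match PySem.Str.split₀ r with
      | [a, b] =>
          if PySem.Set.contains acc.2 (a, b) then acc
          else (acc.1 ++ [(a, b)], PySem.Set.add acc.2 (a, b))
      | _ => acc) (([] : List (String × String)), (PySem.Set.empty : PySem.Set (String × String)))
      = (report.map pvPairOf).foldl (fun acc p =>
          if PySem.Set.contains acc.2 p then acc
          else (acc.1 ++ [p], PySem.Set.add acc.2 p)) ([], PySem.Set.empty) := by
    rw [List.foldl_map]
    apply PySem.List.foldl_congr_mem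
    intro acc r hr
    have h2 := h r hr
    rcases hl : PySem.Str.split₀ r with _ | ⟨a, _ | ⟨b, _ | ⟨c, t⟩⟩⟩ <;>
      simp [hl] at h2 ⊢ <;> simp [pvPairOf, hl]
  rw [hc]
  have he : (PySem.Set.empty : PySem.Set (String × String)) = ([] : List (String × String)) := rfl
  rw [he, pvPairs_fold, PySem.List.dedup_eq_ofList, PySem.Set.update_nil_left]

-- a fold that inserts the constant c leaves every getD-with-default-c at c
theorem getD_foldl_insert_const {ν : Type} (c : ν) (l : List String)
    (d : PySem.Dict String ν) (hd : ∀ y, d.getD y c = c) (x : String) :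
    (l.foldl (fun d i => d.insert i c) d).getD x c = c := by
  induction l generalizing d with
  | nil => exact hd x
  | cons i l ih =>
    rw [List.foldl_cons]
    exact ih _ (fun y => by rw [PySem.Dict.getD_insert]; split <;> simp [hd])

-- A's declaration dict, looked up at any id
theorem pvDecl_getD_fold (l : List (String × String))
    (d : PySem.Dict String (PySem.Set String)) (id : String) :
    (l.foldl (fun d p => d.modify p.1 PySem.Set.empty (fun s => PySem.Set.add s p.2)) d).getD id PySem.Set.empty
    = PySem.Set.update (d.getD id PySem.Set.empty) ((l.filter (fun p => p.1 == id)).map Prod.snd) := by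
  induction l generalizing d with
  | nil => simp [PySem.Set.update_nil]
  | cons p l ih =>
    rw [List.foldl_cons, ih]
    by_cases hp : p.1 = id
    · rw [List.filter_cons_of_pos (by simp [hp]), List.map_cons, PySem.Set.update_cons]
      rw [← hp, PySem.Dict.getD_modify_self]
    · rw [List.filter_cons_of_neg (by simp [hp]),
        PySem.Dict.getD_modify_of_ne _ _ _ (fun e => hp e.symm)]

theorem pvDecl_getD (id_list report : List String)
    (h : ∀ r ∈ report, (PySem.Str.split₀ r).length = 2) (id : String) :
    (pvDecl id_list report).getD id PySem.Set.empty
    = PySem.Set.ofList (((report.map pvPairOf).filter (fun p => p.1 == id)).map Prod.snd) := by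
  unfold pvDecl
  rw [pvDecl_fold_pairs report h, pvDecl_getD_fold]
  have h0 : (pvDeclInit id_list).getD id PySem.Set.empty = PySem.Set.empty :=
    getD_foldl_insert_const _ _ _ (fun y => rfl) id
  rw [h0]
  exact PySem.Set.update_nil_left _

-- A's nested counting loop
theorem pvCounts_getD_fold (its : List (String × PySem.Set String))
    (c : PySem.Dict String Int) (p : String) :
    (its.foldl (fun c de => de.2.foldl (fun c q => c.modify q 0 (fun x => x + 1)) c) c).getD p 0
    = c.getD p 0 + (its.map (fun de => (de.2.count p : Int))).sum := by
  induction its generalizing c with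
  | nil => simp
  | cons de its ih =>
    rw [List.foldl_cons, ih, PySem.Dict.getD_foldl_modify_add_one, List.map_cons, List.sum_cons]
    ring

-- keys only grow through the nested counting loop
theorem pvCounts_keys_mem (its : List (String × PySem.Set String)) (c : PySem.Dict String Int)
    (y : String) (hy : y ∈ c.keys) :
    y ∈ (its.foldl (fun c de => de.2.foldl (fun c q => c.modify q 0 (fun x => x + 1)) c) c).keys := by
  induction its generalizing c with
  | nil => exact hy
  | cons de its ih =>
    rw [List.foldl_cons]
    apply ih
    rw [PySem.Dict.keys_foldl_modify]
    exact (PySem.Set.mem_update _ _ _).mpr (Or.inl hy)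

-- keys of a constant-value insertion loop from the empty dict
theorem keys_insert_const {ν : Type} (c : ν) (l : List String) :
    (l.foldl (fun d i => d.insert i c) (PySem.Dict.empty : PySem.Dict String ν)).keys
    = PySem.Set.ofList l := by
  rw [PySem.Dict.keys_foldl_insert]
  exact PySem.Set.update_nil_left _

-- the keys of A's declaration dict are exactly the distinct ids
theorem pvDecl_keys (id_list report : List String)
    (hlen : ∀ r ∈ report, (PySem.Str.split₀ r).length = 2)
    (hfst : ∀ p ∈ report.map pvPairOf, p.1 ∈ id_list) :
    (pvDecl id_list report).keys = PySem.Set.ofList id_list := by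
  unfold pvDecl
  rw [pvDecl_fold_pairs report hlen, PySem.Dict.keys_foldl_modify_key]
  unfold pvDeclInit
  rw [keys_insert_const, PySem.Set.update_eq_append_filter]
  have hnil : ((PySem.Set.ofList ((report.map pvPairOf).map Prod.fst)).filter
      (fun y => !(PySem.Set.ofList id_list).contains y)) = [] := by
    apply List.filter_eq_nil_iff.mpr
    intro y hy
    have hy' : y ∈ (report.map pvPairOf).map Prod.fst := by simpa using hy
    obtain ⟨p, hp, rfl⟩ := List.mem_map.mp hy'
    simp [hfst p hp]
  rw [hnil, List.append_nil]

-- membership in the conditional-add fold that builds stoppedUser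
theorem mem_foldl_add_if (l : List String) (s : PySem.Set String)
    (c : String → Prop) [DecidablePred c] (y : String) :
    y ∈ l.foldl (fun st p => if c p then PySem.Set.add st p else st) s
    ↔ y ∈ s ∨ (y ∈ l ∧ c y) := by
  induction l generalizing s with
  | nil => simp
  | cons p l ih =>
    rw [List.foldl_cons]
    by_cases hp : c p
    · rw [if_pos hp, ih]
      simp only [PySem.Set.mem_add, List.mem_cons]
      constructor
      · rintro ((h | rfl) | h)
        · exact Or.inl h
        · exact Or.inr ⟨Or.inl rfl, hp⟩
        · exact Or.inr ⟨Or.inr h.1, h.2⟩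
      · rintro (h | ⟨(rfl | h), hc⟩)
        · exact Or.inl (Or.inl h)
        · exact Or.inl (Or.inr rfl)
        · exact Or.inr ⟨h, hc⟩
    · rw [if_neg hp, ih]
      simp only [List.mem_cons]
      constructor
      · rintro (h | h)
        · exact Or.inl h
        · exact Or.inr ⟨Or.inr h.1, h.2⟩
      · rintro (h | ⟨(rfl | h), hc⟩)
        · exact Or.inl h
        · exact absurd hc hp
        · exact Or.inr ⟨h, hc⟩

-- B's conditional counting loop
theorem getD_foldl_modify_if (l : List (String × String)) (d : PySem.Dict String Int)
    (c : String × String → Prop) [DecidablePred c] (x : String) :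
    (l.foldl (fun d p => if c p then d.modify p.1 0 (fun v => v + 1) else d) d).getD x 0
    = d.getD x 0 + (((l.filter (fun p => decide (c p))).map Prod.fst).count x : Int) := by
  induction l generalizing d with
  | nil => simp
  | cons p l ih =>
    rw [List.foldl_cons]
    by_cases hp : c p
    · rw [if_pos hp, ih, List.filter_cons_of_pos (by simp [hp]), List.map_cons]
      by_cases hx : x = p.1
      · subst hx
        rw [PySem.Dict.getD_modify_self, List.count_cons_self]
        push_cast
        ring
      · rw [PySem.Dict.getD_modify_of_ne _ _ _ hx]
        simp [Ne.symm hx]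
    · rw [if_neg hp, ih, List.filter_cons_of_neg (by simp [hp])]

-- dedup commutes with filter
theorem dedup_filter {α : Type} [BEq α] [LawfulBEq α] (l : List α) (c : α → Bool) :
    PySem.List.dedup (l.filter c) = (PySem.List.dedup l).filter c := by
  induction l using List.reverseRecOn with
  | nil => simp
  | append_singleton xs x ih =>
    simp only [List.filter_append, PySem.List.dedup_eq_ofList] at *
    by_cases hc : c x
    · rw [show List.filter c [x] = [x] by simp [hc], PySem.Set.ofList_append_singleton,
        PySem.Set.ofList_append_singleton, ih]
      by_cases hx : x ∈ PySem.Set.ofList xs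
      · rw [PySem.Set.add_of_mem hx, PySem.Set.add_of_mem (by simp [List.mem_filter, hx, hc])]
      · rw [PySem.Set.add_of_not_mem hx, PySem.Set.add_of_not_mem
          (fun h => hx (List.mem_filter.mp h).1), List.filter_append]
        simp [hc]
    · rw [show List.filter c [x] = [] by simp [hc], List.append_nil,
        PySem.Set.ofList_append_singleton, ih]
      by_cases hx : x ∈ PySem.Set.ofList xs
      · rw [PySem.Set.add_of_mem hx]
      · rw [PySem.Set.add_of_not_mem hx, List.filter_append]
        simp [hc]

-- dedup commutes with a map injective on the list
theorem dedup_map_inj {α β : Type} [BEq α] [LawfulBEq α] [BEq β] [LawfulBEq β]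
    (l : List α) (f : α → β)
    (hinj : ∀ x ∈ l, ∀ y ∈ l, f x = f y → x = y) :
    PySem.List.dedup (l.map f) = (PySem.List.dedup l).map f := by
  induction l using List.reverseRecOn with
  | nil => simp
  | append_singleton xs x ih =>
    have hinj' : ∀ x' ∈ xs, ∀ y ∈ xs, f x' = f y → x' = y := fun a ha b hb =>
      hinj a (by simp [ha]) b (by simp [hb])
    simp only [List.map_append, List.map_cons, List.map_nil, PySem.List.dedup_eq_ofList] at *
    rw [PySem.Set.ofList_append_singleton, PySem.Set.ofList_append_singleton, ih hinj']
    by_cases hx : x ∈ PySem.Set.ofList xs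
    · rw [PySem.Set.add_of_mem hx, PySem.Set.add_of_mem]
      exact List.mem_map_of_mem hx
    · rw [PySem.Set.add_of_not_mem hx, PySem.Set.add_of_not_mem, List.map_append]
      · rfl
      · intro h
        obtain ⟨y, hy, hfy⟩ := List.mem_map.mp h
        have hy' : y ∈ xs := by simpa using hy
        have hyx : y = x := hinj y (by simp [hy']) x (by simp) hfy
        exact hx (hyx ▸ hy)

-- A's distinct-reporter count equals B's count over the deduplicated pair list
theorem count_eq (ids : List String) (M : List (String × String)) (b : String)
    (hfst : ∀ p ∈ M, p.1 ∈ ids) :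
    (((PySem.List.dedup ids).filter (fun id => decide ((id, b) ∈ M))).length : Int)
    = ((PySem.List.dedup M).map Prod.snd).count b := by
  have hR : ((PySem.List.dedup M).map Prod.snd).count b
      = ((PySem.List.dedup M).filter (fun p => p.2 == b)).length := by
    rw [List.count_eq_countP, List.countP_map, List.countP_eq_length_filter]
    rfl
  have hnodL : ((PySem.List.dedup ids).filter (fun id => decide ((id, b) ∈ M))).Nodup :=
    (PySem.List.nodup_dedup ids).filter _
  have hnodM : ((PySem.List.dedup M).filter (fun p => p.2 == b)).Nodup :=
    (PySem.List.nodup_dedup M).filter _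
  have hnodR : (((PySem.List.dedup M).filter (fun p => p.2 == b)).map Prod.fst).Nodup := by
    apply List.Nodup.map_on _ hnodM
    intro x hx y hy hxy
    have hx2 : x.2 = b := by simpa using (List.of_mem_filter hx)
    have hy2 : y.2 = b := by simpa using (List.of_mem_filter hy)
    exact Prod.ext hxy (hx2.trans hy2.symm)
  have hperm : ((PySem.List.dedup ids).filter (fun id => decide ((id, b) ∈ M))).Perm
      (((PySem.List.dedup M).filter (fun p => p.2 == b)).map Prod.fst) := by
    rw [List.perm_ext_iff_of_nodup hnodL hnodR]
    intro a
    simp only [List.mem_filter, List.mem_map, PySem.List.mem_dedup, decide_eq_true_eq,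
      beq_iff_eq]
    constructor
    · rintro ⟨_, hab⟩
      exact ⟨(a, b), ⟨hab, rfl⟩, rfl⟩
    · rintro ⟨p, ⟨hp, h2⟩, h1⟩
      have : p = (a, b) := Prod.ext h1 h2
      subst this
      exact ⟨hfst _ hp, hp⟩
  rw [hR, hperm.length_eq, List.length_map]

-- ===== VERDICT (by name: the statement is the Claim_ definition above) =====
theorem solution_spec : Claim_equal_solution := by
  intro id_list report k _ hpre
  unfold Spec_solution solution solution_alt
  apply List.map_congr_left
  intro id hid
  have hlen : ∀ r ∈ report, (PySem.Str.split₀ r).length = 2 := fun r hr => (hpre r hr).1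
  have hmemM : ∀ p ∈ report.map pvPairOf, p.1 ∈ id_list ∧ p.2 ∈ id_list := by
    intro p hp
    obtain ⟨r, hr, rfl⟩ := List.mem_map.mp hp
    obtain ⟨h2, hall⟩ := hpre r hr
    rcases hl : PySem.Str.split₀ r with _ | ⟨a, _ | ⟨b, _ | ⟨c, t⟩⟩⟩ <;>
      rw [hl] at h2 hall <;> simp at h2
    refine ⟨?_, ?_⟩ <;> simp [pvPairOf, hl] <;>
      [exact hall a (by simp); exact hall b (by simp)]
  -- B's distinct-reporter counter
  have hcnt : ∀ b, (pvCnt report).getD b 0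
      = (((PySem.List.dedup (report.map pvPairOf)).map Prod.snd).count b : Int) := by
    intro b
    unfold pvCnt
    rw [pvPairs_eq report hlen,
      ← List.foldl_map (f := Prod.snd)
        (g := fun (d : PySem.Dict String Int) x => d.insert x (d.getD x 0 + 1)),
      PySem.Dict.getD_foldl_insert_add_one]
    rw [show (PySem.Dict.empty : PySem.Dict String Int).getD b 0 = 0 from rfl, zero_add]
  -- A's declaration dict: keys and items
  have hkeysD : (pvDecl id_list report).keys = PySem.Set.ofList id_list :=
    pvDecl_keys id_list report hlen (fun p hp => (hmemM p hp).1)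
  have hitems : (pvDecl id_list report).items
      = (PySem.Set.ofList id_list).map
          (fun key => (key, (pvDecl id_list report).getD key PySem.Set.empty)) := by
    rw [← hkeysD]
    exact PySem.Dict.items_eq_map_keys _
      (by rw [hkeysD]; exact PySem.Set.nodup_ofList _) _
  -- A's counter agrees with B's counter
  have hcounts : ∀ y, (pvCounts id_list report).getD y 0 = (pvCnt report).getD y 0 := by
    intro y
    unfold pvCounts
    rw [pvCounts_getD_fold, hitems, List.map_map]
    have h0 : (pvCountsInit id_list).getD y 0 = 0 := by
      unfold pvCountsInit
      exact getD_foldl_insert_const _ _ _ (fun z => rfl) y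
    rw [h0, zero_add]
    have hterm : ∀ key ∈ PySem.Set.ofList id_list,
        ((fun de => ((de.2 : PySem.Set String).count y : Int)) ∘
          (fun key => (key, (pvDecl id_list report).getD key PySem.Set.empty))) key
        = if (fun idq => decide ((idq, y) ∈ report.map pvPairOf)) key = true then (1 : Int) else 0 := by
      intro key _
      simp only [Function.comp_apply]
      rw [pvDecl_getD id_list report hlen key]
      by_cases hky : (key, y) ∈ report.map pvPairOf
      · rw [if_pos (by simpa using hky)]
        have hmem : y ∈ PySem.Set.ofList (((report.map pvPairOf).filter
            (fun p => p.1 == key)).map Prod.snd) := by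
          rw [PySem.Set.mem_ofList]
          exact List.mem_map.mpr ⟨(key, y), List.mem_filter.mpr ⟨hky, by simp⟩, rfl⟩
        rw [List.count_eq_one_of_mem (PySem.Set.nodup_ofList _) hmem]
        norm_num
      · rw [if_neg (by simpa using hky)]
        have hmem : y ∉ PySem.Set.ofList (((report.map pvPairOf).filter
            (fun p => p.1 == key)).map Prod.snd) := by
          intro hmemy
          apply hky
          rw [PySem.Set.mem_ofList] at hmemy
          obtain ⟨p, hp, h2⟩ := List.mem_map.mp hmemy
          obtain ⟨hpM, h1⟩ := List.mem_filter.mp hp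
          exact (Prod.ext (by simpa using h1) h2 : p = (key, y)) ▸ hpM
        rw [List.count_eq_zero.mpr hmem]
        norm_num
    rw [List.map_congr_left hterm, PySem.List.sum_map_ite_one_zero,
      List.countP_eq_length_filter, ← PySem.List.dedup_eq_ofList,
      count_eq id_list (report.map pvPairOf) y (fun p hp => (hmemM p hp).1), hcnt y]
  -- stoppedUser membership
  have hstop : ∀ y, y ∈ pvStopped id_list report k ↔
      (y ∈ (pvCounts id_list report).keys ∧ k ≤ (pvCounts id_list report).getD y 0) := by
    intro y
    unfold pvStopped
    rw [mem_foldl_add_if]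
    simp
  have hkeysC : ∀ y, y ∈ id_list → y ∈ (pvCounts id_list report).keys := by
    intro y hy
    unfold pvCounts
    apply pvCounts_keys_mem
    unfold pvCountsInit
    rw [keys_insert_const]
    simpa using hy
  -- B's per-id value
  have hB : (pvRes id_list report k).getD id 0
      = ((((PySem.List.dedup (report.map pvPairOf)).filter
            (fun p => decide (k ≤ (pvCnt report).getD p.2 0))).map Prod.fst).count id : Int) := by
    unfold pvRes
    rw [getD_foldl_modify_if _ _ (fun p => k ≤ (pvCnt report).getD p.2 0), pvPairs_eq report hlen]
    have h0 : (pvResInit id_list).getD id 0 = 0 := by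
      unfold pvResInit
      exact getD_foldl_insert_const _ _ _ (fun z => rfl) id
    rw [h0, zero_add]
  -- A's per-id reported set, as a list
  have hS : (pvDecl id_list report).getD id PySem.Set.empty
      = ((PySem.List.dedup (report.map pvPairOf)).filter
          (fun p => p.1 == id)).map Prod.snd := by
    rw [pvDecl_getD id_list report hlen id, ← PySem.List.dedup_eq_ofList,
      dedup_map_inj _ Prod.snd ?_, dedup_filter]
    intro x hx y hy hxy
    have hx1 : x.1 = id := by simpa using (List.of_mem_filter hx)
    have hy1 : y.1 = id := by simpa using (List.of_mem_filter hy)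
    exact Prod.ext (hx1.trans hy1.symm) hxy
  -- the banning condition, on members of A's per-id set
  have hcond : ∀ y ∈ ((PySem.List.dedup (report.map pvPairOf)).filter
        (fun p => p.1 == id)).map Prod.snd,
      PySem.Set.contains (pvStopped id_list report k) y
      = decide (k ≤ (pvCnt report).getD y 0) := by
    intro y hy
    obtain ⟨p, hp, rfl⟩ := List.mem_map.mp hy
    have hpM : p ∈ report.map pvPairOf := (PySem.List.mem_dedup _ _).mp (List.mem_of_mem_filter hp)
    have hyid : p.2 ∈ id_list := (hmemM p hpM).2
    rw [Bool.eq_iff_iff, PySem.Set.contains_iff, hstop, decide_eq_true_eq]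
    constructor
    · intro h
      rw [← hcounts p.2]
      exact h.2
    · intro h
      exact ⟨hkeysC p.2 hyid, by rw [hcounts p.2]; exact h⟩
  -- assemble
  show PySem.Set.len (PySem.Set.inter ((pvDecl id_list report).getD id PySem.Set.empty)
    (pvStopped id_list report k)) = (pvRes id_list report k).getD id 0
  rw [show PySem.Set.len (PySem.Set.inter ((pvDecl id_list report).getD id PySem.Set.empty)
        (pvStopped id_list report k))
      = ((((pvDecl id_list report).getD id PySem.Set.empty).filter
          (fun y => PySem.Set.contains (pvStopped id_list report k) y)).length : Int) from rfl,
    hS, List.filter_congr hcond, hB, List.filter_map]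
  rw [List.count_eq_countP, List.countP_map, List.countP_eq_length_filter]
  rw [List.length_map, List.filter_comm]
  rfl
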